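-- pv_equiv track=rewrite | github.com/mepavan7/python-practice | reversepattern/reverseeveryblockofk.py | reverse_every_block_k
-- ===== SOURCE A (Python) =====
-- def reverse_every_block_k(s, k):
--     count = 0
--     parts = []
--     for i in range(0, len(s), k):
--         block = s[i:i+k]
--         count += 1
--         if count % 3 == 0:
--             parts.append(block[::-1])
--         else:
--             parts.append(block)
--     return "".join(parts)
-- ===== SOURCE B (Python) =====
-- def reverse_every_block_k(s, k):
--     pieces = []
--     for j in range(0, len(s), 3 * k):
--         pieces.append(s[j:j + 2 * k])
--         pieces.append(s[j + 2 * k:j + 3 * k][::-1])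
--     return "".join(pieces)
-- ===== Notes on version B (the rewrite author's own statement) =====
-- stated objective: simpler
-- what changed: B iterates in strides of 3*k, appending the first two blocks unchanged as one 2k-slice and the reversed third block, eliminating A's block counter and count%3 branch.
import Mathlib
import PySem

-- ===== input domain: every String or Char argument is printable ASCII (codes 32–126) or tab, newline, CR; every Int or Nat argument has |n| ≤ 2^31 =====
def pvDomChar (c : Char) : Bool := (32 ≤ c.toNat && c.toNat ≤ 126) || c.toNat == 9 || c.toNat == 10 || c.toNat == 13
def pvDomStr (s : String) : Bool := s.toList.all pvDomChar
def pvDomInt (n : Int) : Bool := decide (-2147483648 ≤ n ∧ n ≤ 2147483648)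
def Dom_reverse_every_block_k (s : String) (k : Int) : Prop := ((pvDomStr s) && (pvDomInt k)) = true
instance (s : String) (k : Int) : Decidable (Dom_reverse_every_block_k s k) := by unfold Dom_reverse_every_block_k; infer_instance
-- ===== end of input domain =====

-- B reverses every third k-block by iterating over groups of 3*k characters (two slice
-- appends per group, no counter and no mod-3 branch); objective: simpler decomposition.

-- t[::-1] (total in Python; slice? with step -1 never raises)
def pvRevStr (t : String) : String := (PySem.Str.slice? t none none (-1)).getD ""

-- ===== PORT A =====
-- loop body of A: block = s[i:i+k]; count += 1; append reversed block iff count % 3 == 0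
def stepA (s : String) (k : Int) (st : Int × List String) (i : Int) : Int × List String :=
  let block := PySem.Str.slice s (some i) (some (i + k))
  let count := st.1 + 1
  if count % 3 = 0 then (count, st.2 ++ [pvRevStr block])
  else (count, st.2 ++ [block])

def reverse_every_block_k (s : String) (k : Int) : String :=
  let st := (PySem.List.pyRange 0 (PySem.Str.len s) k).foldl (stepA s k) (0, [])
  PySem.Str.join "" st.2

-- ===== PORT B =====
-- loop body of B: append s[j:j+2k] and reversed s[j+2k:j+3k]
def stepB (s : String) (k : Int) (acc : List String) (j : Int) : List String :=
  acc ++ [PySem.Str.slice s (some j) (some (j + 2 * k)),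
          pvRevStr (PySem.Str.slice s (some (j + 2 * k)) (some (j + 3 * k)))]

def reverse_every_block_k_alt (s : String) (k : Int) : String :=
  let pieces := (PySem.List.pyRange 0 (PySem.Str.len s) (3 * k)).foldl (stepB s k) []
  PySem.Str.join "" pieces

-- ===== PRECONDITION & SPEC =====
-- k = 0 makes range(0, len(s), 0) raise ValueError in Python (both A and B); nothing else raises.
def Pre_reverse_every_block_k (s : String) (k : Int) : Prop := k ≠ 0
instance (s : String) (k : Int) : Decidable (Pre_reverse_every_block_k s k) := by unfold Pre_reverse_every_block_k; infer_instance

def pvWitness_reverse_every_block_k : String × Int := ("abcdefgh", 2)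

def Spec_reverse_every_block_k (s : String) (k : Int) (out : String) : Prop := out = reverse_every_block_k_alt s k
instance (s : String) (k : Int) (out : String) : Decidable (Spec_reverse_every_block_k s k out) := by unfold Spec_reverse_every_block_k; infer_instance

-- ===== CLAIM (what is proved, stated in full; the proofs are below) =====
def Claim_equal_reverse_every_block_k : Prop := ∀ (s : String) (k : Int), Dom_reverse_every_block_k s k → Pre_reverse_every_block_k s k → Spec_reverse_every_block_k s k (reverse_every_block_k s k)

-- ===== LEMMAS AND PROOFS =====

-- "".join(ps) is the flattening of the pieces
theorem join_empty_flatten (ps : List String) :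
    PySem.Str.join "" ps = String.ofList ((ps.map String.toList).flatten) := by
  unfold PySem.Str.join PySem.Chars.join
  congr 1
  show List.intercalate ([] : List Char) _ = _
  unfold List.intercalate
  induction ps.map String.toList with
  | nil => rfl
  | cons a l ih => cases l <;> simp_all [List.intersperse]

-- range(a, b, k) with k > 0 and a < b starts with a
theorem pyRange_pos_cons {a b k : Int} (hk : 0 < k) (hab : a < b) :
    PySem.List.pyRange a b k = a :: PySem.List.pyRange (a + k) b k := by
  rw [PySem.List.pyRange_of_pos a b hk, PySem.List.pyRange_of_pos (a + k) b hk]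
  rw [if_pos hab]
  have hq : (b - a + k - 1) / k = (b - a - 1) / k + 1 := by
    have := Int.add_mul_ediv_right (b - a - 1) 1 (ne_of_gt hk)
    simpa [one_mul] using (by rw [show b - a + k - 1 = b - a - 1 + 1 * k by ring, this])
  have hqn : 0 ≤ (b - a - 1) / k := Int.ediv_nonneg (by omega) (le_of_lt hk)
  rw [hq]
  have htn : ((b - a - 1) / k + 1).toNat = ((b - a - 1) / k).toNat + 1 := by omega
  rw [htn, List.range_succ_eq_map]
  simp only [List.map_cons, List.map_map]
  refine congrArg₂ List.cons (by simp) ?_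
  by_cases h2 : a + k < b
  · rw [if_pos h2]
    have : b - (a + k) + k - 1 = b - a - 1 := by ring
    rw [this]
    apply List.map_congr_left
    intro j _
    simp [Function.comp, Nat.succ_eq_add_one]
    ring
  · rw [if_neg h2]
    have hz : (b - a - 1) / k = 0 := Int.ediv_eq_zero_of_lt (by omega) (by omega)
    rw [hz]
    simp

-- range(a, b, k) with k > 0 and b ≤ a is empty
theorem pyRange_pos_nil {a b k : Int} (hk : 0 < k) (hab : b ≤ a) :
    PySem.List.pyRange a b k = [] := by
  rw [PySem.List.pyRange_of_pos a b hk, if_neg (by omega)]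
  simp

-- range(0, n, k) with k < 0 and 0 ≤ n is empty
theorem pyRange_neg_nil {n k : Int} (hk : k < 0) (hn : 0 ≤ n) :
    PySem.List.pyRange 0 n k = [] := by
  rw [PySem.List.pyRange_of_neg 0 n hk, if_neg (by omega)]
  simp

theorem stepA_eq (s : String) (k : Int) (c : Int) (parts : List String) (i : Int) :
    stepA s k (c, parts) i =
      (c + 1, parts ++ [if (c + 1) % 3 = 0 then pvRevStr (PySem.Str.slice s (some i) (some (i + k)))
                        else PySem.Str.slice s (some i) (some (i + k))]) := by
  simp only [stepA]
  split_ifs <;> rfl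

-- accumulator extraction for A's fold
theorem foldA_extract (s : String) (k : Int) (l : List Int) :
    ∀ (c : Int) (parts : List String),
      (l.foldl (stepA s k) (c, parts)).2 = parts ++ (l.foldl (stepA s k) (c, [])).2 := by
  induction l with
  | nil => intro c parts; simp
  | cons a l ih =>
    intro c parts
    simp only [List.foldl_cons, stepA_eq]
    rw [ih, ih (c + 1) ([] ++ _)]
    simp

-- accumulator extraction for B's fold
theorem foldB_extract (s : String) (k : Int) (l : List Int) :
    ∀ (acc : List String),
      l.foldl (stepB s k) acc = acc ++ l.foldl (stepB s k) [] := by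
  induction l with
  | nil => intro acc; simp
  | cons a l ih =>
    intro acc
    simp only [List.foldl_cons, stepB]
    rw [ih, ih ([] ++ _)]
    simp

-- pieces produced by A's loop from position i with counter c
def FA (s : String) (k i c : Int) : List String :=
  ((PySem.List.pyRange i (PySem.Str.len s) k).foldl (stepA s k) (c, [])).2

-- pieces produced by B's loop from position i
def FB (s : String) (k i : Int) : List String :=
  (PySem.List.pyRange i (PySem.Str.len s) (3 * k)).foldl (stepB s k) []

-- toList of a slice with nonnegative bounds
theorem toList_slice (s : String) (a b : Int) (ha : 0 ≤ a) (hb : 0 ≤ b) :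
    (PySem.Str.slice s (some a) (some b)).toList = (s.toList.drop a.toNat).take (b.toNat - a.toNat) := by
  unfold PySem.Str.slice PySem.Chars.slice
  rw [String.toList_ofList]
  exact PySem.List.slice_toNat s.toList ha hb

theorem toList_pvRevStr (t : String) : (pvRevStr t).toList = t.toList.reverse := by
  unfold pvRevStr
  rw [PySem.Str.slice?_none_none_neg_one]
  simp

-- the core equivalence: from any group boundary i (counter ≡ 0 mod 3), A's pieces and
-- B's pieces flatten to the same character list
theorem main_lemma (s : String) (k : Int) (hk : 0 < k) :
    ∀ (m : Nat) (i c : Int), 0 ≤ i → c % 3 = 0 → (PySem.Str.len s - i).toNat ≤ m →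
      ((FA s k i c).map String.toList).flatten = ((FB s k i).map String.toList).flatten := by
  intro m
  induction m with
  | zero =>
    intro i c hi hc hm
    have hn : PySem.Str.len s ≤ i := by omega
    unfold FA FB
    rw [pyRange_pos_nil hk hn, pyRange_pos_nil (by omega) hn]
    rfl
  | succ m ih =>
    intro i c hi hc hm
    by_cases h1 : i < PySem.Str.len s
    case neg =>
      unfold FA FB
      rw [pyRange_pos_nil hk (by omega), pyRange_pos_nil (by omega) (by omega)]
      rfl
    -- B takes one step of 3k
    have hB : FB s k i = [PySem.Str.slice s (some i) (some (i + 2 * k)),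
                          pvRevStr (PySem.Str.slice s (some (i + 2 * k)) (some (i + 3 * k)))]
                         ++ FB s k (i + 3 * k) := by
      unfold FB
      rw [pyRange_pos_cons (by omega) h1, List.foldl_cons, foldB_extract]
      simp [stepB]
    -- A takes one step of k
    have hA1 : FA s k i c = (if (c + 1) % 3 = 0 then pvRevStr (PySem.Str.slice s (some i) (some (i + k)))
                             else PySem.Str.slice s (some i) (some (i + k))) :: FA s k (i + k) (c + 1) := by
      unfold FA
      rw [pyRange_pos_cons hk h1, List.foldl_cons, stepA_eq]
      rw [foldA_extract]
      simp
    rw [if_neg (by omega)] at hA1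
    have hlen : PySem.Str.len s = (s.toList.length : Int) := rfl
    by_cases h2 : i + k < PySem.Str.len s
    case neg =>
      -- only one (possibly short) block in this group
      have hA2 : FA s k (i + k) (c + 1) = [] := by
        unfold FA; rw [pyRange_pos_nil hk (by omega)]; rfl
      have hB2 : FB s k (i + 3 * k) = [] := by
        unfold FB; rw [pyRange_pos_nil (by omega) (by omega)]; rfl
      rw [hA1, hA2, hB, hB2]
      simp only [List.map_cons, List.map_nil, List.flatten_cons, List.flatten_nil,
        List.append_nil]
      rw [toList_slice s i (i + k) hi (by omega), toList_slice s i (i + 2 * k) hi (by omega),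
          toList_pvRevStr, toList_slice s (i + 2 * k) (i + 3 * k) (by omega) (by omega)]
      have hd : s.toList.drop (i + 2 * k).toNat = [] := List.drop_eq_nil_of_le (by omega)
      rw [hd]
      simp only [List.take_nil, List.reverse_nil, List.append_nil]
      have hshort : (s.toList.drop i.toNat).length ≤ k.toNat := by
        rw [List.length_drop]; omega
      rw [List.take_of_length_le (by omega), List.take_of_length_le (by omega)]
    by_cases h3 : i + 2 * k < PySem.Str.len s
    case neg =>
      -- two blocks in this group, the second possibly short
      have hA2 : FA s k (i + k) (c + 1)
          = PySem.Str.slice s (some (i + k)) (some (i + k + k)) :: FA s k (i + 2 * k) (c + 2) := by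
        unfold FA
        rw [pyRange_pos_cons hk (by omega), List.foldl_cons, stepA_eq, if_neg (by omega), foldA_extract]
        simp [show i + k + k = i + 2 * k by ring, show c + 1 + 1 = c + 2 by ring]
      have hA3 : FA s k (i + 2 * k) (c + 2) = [] := by
        unfold FA; rw [pyRange_pos_nil hk (by omega)]; rfl
      have hB2 : FB s k (i + 3 * k) = [] := by
        unfold FB; rw [pyRange_pos_nil (by omega) (by omega)]; rfl
      rw [hA1, hA2, hA3, hB, hB2]
      simp only [List.map_cons, List.map_nil, List.flatten_cons, List.flatten_nil,
        List.append_nil]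
      rw [toList_slice s i (i + k) hi (by omega),
          toList_slice s (i + k) (i + k + k) (by omega) (by omega),
          toList_slice s i (i + 2 * k) hi (by omega), toList_pvRevStr,
          toList_slice s (i + 2 * k) (i + 3 * k) (by omega) (by omega)]
      have hd : s.toList.drop (i + 2 * k).toNat = [] := List.drop_eq_nil_of_le (by omega)
      rw [hd]
      simp only [List.take_nil, List.reverse_nil, List.append_nil]
      have e1 : (i + 2 * k).toNat - i.toNat = (k.toNat + k.toNat) := by omega
      have e2 : (i + k).toNat - i.toNat = k.toNat := by omega
      have e3 : (i + k + k).toNat - (i + k).toNat = k.toNat := by omega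
      have hdd : s.toList.drop (i + k).toNat = (s.toList.drop i.toNat).drop k.toNat := by
        rw [List.drop_drop]
        congr 1
        omega
      rw [e1, e2, e3, List.take_add, hdd]
    -- full group of three blocks
    have hA2 : FA s k (i + k) (c + 1)
        = PySem.Str.slice s (some (i + k)) (some (i + k + k)) :: FA s k (i + 2 * k) (c + 2) := by
      unfold FA
      rw [pyRange_pos_cons hk (by omega), List.foldl_cons, stepA_eq, if_neg (by omega), foldA_extract]
      simp [show i + k + k = i + 2 * k by ring, show c + 1 + 1 = c + 2 by ring]
    have hA3 : FA s k (i + 2 * k) (c + 2)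
        = pvRevStr (PySem.Str.slice s (some (i + 2 * k)) (some (i + 2 * k + k))) :: FA s k (i + 3 * k) (c + 3) := by
      unfold FA
      rw [pyRange_pos_cons hk (by omega), List.foldl_cons, stepA_eq, if_pos (by omega), foldA_extract]
      simp [show i + 2 * k + k = i + 3 * k by ring, show c + 2 + 1 = c + 3 by ring]
    have hIH : ((FA s k (i + 3 * k) (c + 3)).map String.toList).flatten
        = ((FB s k (i + 3 * k)).map String.toList).flatten := by
      exact ih (i + 3 * k) (c + 3) (by omega) (by omega) (by omega)
    rw [hA1, hA2, hA3, hB]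
    simp only [List.map_cons, List.map_append, List.flatten_cons, List.flatten_append]
    rw [hIH]
    have hsplit : (PySem.Str.slice s (some i) (some (i + 2 * k))).toList
        = (PySem.Str.slice s (some i) (some (i + k))).toList
          ++ (PySem.Str.slice s (some (i + k)) (some (i + k + k))).toList := by
      rw [toList_slice s i (i + k) hi (by omega),
          toList_slice s (i + k) (i + k + k) (by omega) (by omega),
          toList_slice s i (i + 2 * k) hi (by omega),
          show (i + 2 * k).toNat - i.toNat = k.toNat + k.toNat by omega,
          show (i + k).toNat - i.toNat = k.toNat by omega,
          show (i + k + k).toNat - (i + k).toNat = k.toNat by omega,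
          List.take_add]
      have hdd : s.toList.drop (i + k).toNat = (s.toList.drop i.toNat).drop k.toNat := by
        rw [List.drop_drop]
        congr 1
        omega
      rw [hdd]
    rw [hsplit, show i + 2 * k + k = i + 3 * k by ring]
    simp [List.append_assoc]

-- ===== VERDICT (by name: the statement is the Claim_ definition above) =====
theorem reverse_every_block_k_spec : Claim_equal_reverse_every_block_k := by
  intro s k _ hk
  unfold Spec_reverse_every_block_k reverse_every_block_k reverse_every_block_k_alt
  simp only []
  rcases lt_or_gt_of_ne hk with hneg | hpos
  · have hn : (0 : Int) ≤ PySem.Str.len s := by simp [PySem.Str.len]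
    rw [pyRange_neg_nil hneg hn, pyRange_neg_nil (by omega) hn]
    rfl
  · have h := main_lemma s k hpos (PySem.Str.len s).toNat 0 0 (le_refl 0) (by decide) (by omega)
    unfold FA FB at h
    rw [join_empty_flatten, join_empty_flatten, h]
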